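-- pv_equiv track=rewrite | github.com/trgnam04/smarthome_gateway | internal/devices/rs485_device.py | _match_hex_template
-- ===== SOURCE A (Python) =====
-- def _match_hex_template(template: str, raw_hex: str) -> bool:
--     """
--     Hàm so khớp chuỗi Hex có hỗ trợ Wildcard 'XX'.
--     Ví dụ: template = "01 03 00 02 XX 02" sẽ khớp với raw_hex = "01 03 00 02 4A 02 8C 3A"
--     """
--     t_bytes = template.strip().split()
--     r_bytes = raw_hex.strip().split()
--
--     # Nếu raw_hex thu được ngắn hơn template cơ bản -> Chắc chắn sai frame
--     if len(r_bytes) < len(t_bytes):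
--         return False
--
--     for t, r in zip(t_bytes, r_bytes):
--         # Nếu template là XX -> Bỏ qua, không check byte này
--         if t.upper() == "XX":
--             continue
--         # Nếu khác nhau -> Không khớp
--         if t.upper() != r.upper():
--             return False
--
--     # Khớp toàn bộ các byte quan trọng (bỏ qua phần đuôi CRC dư thừa nếu có)
--     return True
-- ===== SOURCE B (Python) =====
-- def _match_hex_template(template: str, raw_hex: str) -> bool:
--     # Char-level two-pointer scan: no token lists are built; whitespace runs are
--     # skipped in place and bytes are compared character by character.
--     i, j, n, m = 0, 0, len(template), len(raw_hex)
--     while True: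
--         while i < n and template[i].isspace():
--             i += 1
--         while j < m and raw_hex[j].isspace():
--             j += 1
--         if i >= n:
--             return True
--         k = i
--         while k < n and not template[k].isspace():
--             k += 1
--         if k - i == 2 and template[i] in "xX" and template[i + 1] in "xX":
--             # wildcard byte: skip exactly one raw token
--             if j >= m:
--                 return False
--             while j < m and not raw_hex[j].isspace():
--                 j += 1
--         else:
--             while i < k:
--                 if j >= m or raw_hex[j].isspace():
--                     return False
--                 if template[i].upper() != raw_hex[j].upper():
--                     return False
--                 i += 1
--                 j += 1
--             if j < m and not raw_hex[j].isspace():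
--                 return False
--         i = k
-- ===== Notes on version B (the rewrite author's own statement) =====
-- stated objective: alternative
-- what changed: Replaces A's split-into-token-lists + length check + zip loop by a character-level two-pointer scan over the two raw strings that skips whitespace runs in place and compares bytes char by char, never materialising token lists.
import Mathlib
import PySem

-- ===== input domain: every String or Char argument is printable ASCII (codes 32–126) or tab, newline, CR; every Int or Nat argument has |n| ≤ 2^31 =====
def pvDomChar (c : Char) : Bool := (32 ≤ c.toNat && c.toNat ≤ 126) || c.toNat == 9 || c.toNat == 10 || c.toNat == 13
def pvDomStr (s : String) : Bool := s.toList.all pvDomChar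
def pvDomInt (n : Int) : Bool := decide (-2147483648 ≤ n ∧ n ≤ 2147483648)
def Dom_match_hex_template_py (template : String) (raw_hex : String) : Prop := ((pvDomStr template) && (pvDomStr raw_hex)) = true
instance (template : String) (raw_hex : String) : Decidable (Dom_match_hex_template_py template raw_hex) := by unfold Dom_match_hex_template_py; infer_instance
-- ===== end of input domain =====

-- B replaces A's split-into-token-lists + length check + zip loop by a character-level
-- two-pointer scan over the two strings (alternative decomposition, same O(n) cost).

-- ===== PORT A =====
-- the 'for t, r in zip(t_bytes, r_bytes)' loop with its early 'return False'
def pvALoop : List (String × String) → Bool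
  | [] => true
  | (t, r) :: rest =>
    if PySem.Str.upper t == "XX" then pvALoop rest
    else if ¬ (PySem.Str.upper t == PySem.Str.upper r) then false
    else pvALoop rest

def match_hex_template_py (template : String) (raw_hex : String) : Bool :=
  let t_bytes := PySem.Str.split₀ (PySem.Str.strip template)
  let r_bytes := PySem.Str.split₀ (PySem.Str.strip raw_hex)
  if r_bytes.length < t_bytes.length then false
  else pvALoop (t_bytes.zip r_bytes)

-- ===== PORT B =====
-- Source B's cursors i, j, k into the strings become the remaining suffixes; each
-- 'while i < n and …: i += 1' loop is the corresponding takeWhile/dropWhile.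

-- 'k - i == 2 and template[i] in "xX" and template[i+1] in "xX"' applied to the token
def pvIsWild : List Char → Bool
  | [a, b] => (a == 'x' || a == 'X') && (b == 'x' || b == 'X')
  | _ => false

-- the literal branch: 'while i < k: …' char loop plus the trailing token-boundary check;
-- none = one of its 'return False' exits, some r = fall through with the raw cursor at r
def pvLitScan : List Char → List Char → Option (List Char)
  | [], r =>
    match r with
    | [] => some []
    | c :: _ => if PySem.Chars.isspace c then some r else none
  | c :: tok, r =>
    match r with
    | [] => none
    | d :: r' =>
      if PySem.Chars.isspace d then none
      else if ¬ (PySem.Chars.upperChar c == PySem.Chars.upperChar d) then none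
      else pvLitScan tok r'

-- the outer 'while True' loop of Source B
def pvScan (t r : List Char) : Bool :=
  match ht : t.dropWhile PySem.Chars.isspace with
  | [] => true
  | c :: ts =>
    let r1 := r.dropWhile PySem.Chars.isspace
    let tok := (c :: ts).takeWhile (fun x => !PySem.Chars.isspace x)
    let t' := (c :: ts).dropWhile (fun x => !PySem.Chars.isspace x)
    if pvIsWild tok then
      match r1 with
      | [] => false
      | _ :: _ => pvScan t' (r1.dropWhile (fun x => !PySem.Chars.isspace x))
    else
      match pvLitScan tok r1 with
      | none => false
      | some r2 => pvScan t' r2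
termination_by t.length
decreasing_by
  all_goals
    have hc : PySem.Chars.isspace c = false := by
      have h2 := List.head_dropWhile_not PySem.Chars.isspace (l := t) (by simp [ht])
      simpa only [ht, List.head_cons] using h2
    have h1 : (c :: ts).length ≤ t.length := by
      simpa [ht] using List.length_dropWhile_le PySem.Chars.isspace t
    simp only [List.dropWhile_cons, hc, Bool.not_false, if_pos, List.length_cons] at *
    have h3 := List.length_dropWhile_le (fun x => !PySem.Chars.isspace x) ts
    omega

def match_hex_template_py_alt (template : String) (raw_hex : String) : Bool :=
  pvScan template.toList raw_hex.toList

-- ===== PRECONDITION & SPEC =====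
def Spec_match_hex_template_py (template : String) (raw_hex : String) (out : Bool) : Prop := out = match_hex_template_py_alt template raw_hex
instance (template : String) (raw_hex : String) (out : Bool) : Decidable (Spec_match_hex_template_py template raw_hex out) := by unfold Spec_match_hex_template_py; infer_instance

-- ===== CLAIM (what is proved, stated in full; the proofs are below) =====
def Claim_equal_match_hex_template_py : Prop := ∀ (template : String) (raw_hex : String), Dom_match_hex_template_py template raw_hex → Spec_match_hex_template_py template raw_hex (match_hex_template_py template raw_hex)

-- ===== LEMMAS AND PROOFS =====

-- reference form: pairwise wildcard comparison on char-level token lists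
def pvPairC : List (List Char) → List (List Char) → Bool
  | [], _ => true
  | _ :: _, [] => false
  | t :: ts, r :: rs =>
    if PySem.Chars.upper t = ['X', 'X'] then pvPairC ts rs
    else if PySem.Chars.upper t ≠ PySem.Chars.upper r then false
    else pvPairC ts rs

theorem pvCharEq (a b : Char) : a = b ↔ a.toNat = b.toNat := by
  rw [Char.ext_iff]
  unfold Char.toNat
  exact ⟨fun h => by rw [h], fun h => UInt32.toNat_inj.mp h⟩

theorem upperChar_X (a : Char) : ((a == 'x') || (a == 'X')) = decide (PySem.Chars.upperChar a = 'X') := by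
  by_cases hx : a = 'x'
  · subst hx; decide
  by_cases hX : a = 'X'
  · subst hX; decide
  have hne : PySem.Chars.upperChar a ≠ 'X' := by
    simp only [PySem.Chars.upperChar, PySem.Chars.islower]
    by_cases h : (decide ('a' ≤ a) && decide (a ≤ 'z')) = true
    · simp only [h, if_pos]
      intro hEq
      simp only [Char.le_def, Bool.and_eq_true, decide_eq_true_eq] at h
      have h1 : 97 ≤ a.toNat := UInt32.le_iff_toNat_le.mp h.1
      have h2 : a.toNat ≤ 122 := UInt32.le_iff_toNat_le.mp h.2
      have hv : (a.toNat - 32).isValidChar := Or.inl (by omega)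
      rw [pvCharEq, Char.toNat_ofNat, if_pos hv] at hEq
      have e1 : ('x' : Char).toNat = 120 := by decide
      have e2 : ('X' : Char).toNat = 88 := by decide
      rw [e2] at hEq
      exact hx (by rw [pvCharEq, e1]; omega)
    · simp only [h, Bool.false_eq_true, if_false]
      exact hX
  simp [hx, hX, hne]
theorem pvIsWild_eq (tok : List Char) : pvIsWild tok = decide (PySem.Chars.upper tok = ['X', 'X']) := by
  match tok with
  | [] => simp [pvIsWild, PySem.Chars.upper]
  | [a] => simp [pvIsWild, PySem.Chars.upper]
  | a :: b :: c :: rest => simp [pvIsWild, PySem.Chars.upper]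
  | [a, b] => simp [pvIsWild, PySem.Chars.upper, upperChar_X]
theorem pvLitScan_eq (tok : List Char) : ∀ r : List Char,
    pvLitScan tok r =
      if PySem.Chars.upper tok = PySem.Chars.upper (r.takeWhile (fun x => !PySem.Chars.isspace x))
      then some (r.dropWhile (fun x => !PySem.Chars.isspace x)) else none := by
  induction tok with
  | nil =>
    intro r
    cases r with
    | nil => simp [pvLitScan, PySem.Chars.upper]
    | cons d r' =>
      by_cases hd : PySem.Chars.isspace d <;>
        simp [pvLitScan, hd, PySem.Chars.upper]
  | cons c tok ih =>
    intro r
    cases r with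
    | nil => simp [pvLitScan, PySem.Chars.upper]
    | cons d r' =>
      by_cases hd : PySem.Chars.isspace d
      · simp [pvLitScan, hd, PySem.Chars.upper]
      · by_cases he : PySem.Chars.upperChar c = PySem.Chars.upperChar d
        · have h1 : pvLitScan (c :: tok) (d :: r') = pvLitScan tok r' := by
            simp [pvLitScan, hd, he]
          rw [h1, ih r']
          simp [PySem.Chars.upper, he, hd]
        · simp [pvLitScan, hd, he, PySem.Chars.upper]
theorem pvGoAcc (s : List Char) : ∀ cur acc, PySem.Chars.split₀.go s cur acc
    = acc.reverse ++ PySem.Chars.split₀.go s cur [] := by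
  induction s with
  | nil =>
    intro cur acc
    by_cases hc : cur.isEmpty <;> simp [PySem.Chars.split₀.go, hc]
  | cons c rest ih =>
    intro cur acc
    by_cases hs : PySem.Chars.isspace c
    · by_cases hc : cur.isEmpty
      · simp only [PySem.Chars.split₀.go, hs, hc, if_true]
        exact ih [] acc
      · simp only [PySem.Chars.split₀.go, hs, hc, if_true, Bool.false_eq_true, if_false]
        rw [ih [] (cur.reverse :: acc), ih [] [cur.reverse]]
        simp
    · simp only [PySem.Chars.split₀.go, hs, Bool.false_eq_true, if_false]
      exact ih (c :: cur) acc
theorem pvGoCur (s : List Char) : ∀ cur : List Char, cur ≠ [] →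
    PySem.Chars.split₀.go s cur []
      = (cur.reverse ++ s.takeWhile (fun x => !PySem.Chars.isspace x))
          :: PySem.Chars.split₀.go (s.dropWhile (fun x => !PySem.Chars.isspace x)) [] [] := by
  induction s with
  | nil =>
    intro cur hcur
    simp [PySem.Chars.split₀.go, List.isEmpty_iff, hcur]
  | cons c rest ih =>
    intro cur hcur
    by_cases hs : PySem.Chars.isspace c
    · simp only [PySem.Chars.split₀.go, hs, if_true, List.isEmpty_iff, hcur,
        List.takeWhile_cons, List.dropWhile_cons, Bool.not_eq_true']
      simp only [if_false]
      rw [pvGoAcc rest [] [cur.reverse]]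
      simp [PySem.Chars.split₀.go, hs]
    · simp only [PySem.Chars.split₀.go, hs, Bool.false_eq_true, if_false, List.takeWhile_cons,
        List.dropWhile_cons]
      rw [ih (c :: cur) (by simp)]
      simp
theorem split₀_unfold (s : List Char) :
    PySem.Chars.split₀ s =
      match s.dropWhile PySem.Chars.isspace with
      | [] => []
      | l => l.takeWhile (fun x => !PySem.Chars.isspace x)
              :: PySem.Chars.split₀ (l.dropWhile (fun x => !PySem.Chars.isspace x)) := by
  have hskip : ∀ u : List Char, PySem.Chars.split₀.go u [] []
      = PySem.Chars.split₀.go (u.dropWhile PySem.Chars.isspace) [] [] := by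
    intro u
    induction u with
    | nil => simp
    | cons c rest ih =>
      by_cases hs : PySem.Chars.isspace c
      · simpa [PySem.Chars.split₀.go, hs] using ih
      · simp [hs]
  unfold PySem.Chars.split₀
  rw [hskip s]
  cases hd : s.dropWhile PySem.Chars.isspace with
  | nil => simp [PySem.Chars.split₀.go]
  | cons c l =>
    have hc : PySem.Chars.isspace c = false := by
      have h2 := List.head_dropWhile_not PySem.Chars.isspace (l := s) (by simp [hd])
      simpa only [hd, List.head_cons] using h2
    simp only [PySem.Chars.split₀.go, hc, Bool.false_eq_true, if_false]
    rw [pvGoCur l [c] (by simp)]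
    simp [hc]
theorem pvGoSpaces (t : List Char) (ht : ∀ c ∈ t, PySem.Chars.isspace c) :
    ∀ cur acc, PySem.Chars.split₀.go t cur acc = PySem.Chars.split₀.go [] cur acc := by
  induction t with
  | nil => intro cur acc; rfl
  | cons c rest ih =>
    intro cur acc
    have hc : PySem.Chars.isspace c := ht c (by simp)
    have ih' := ih (fun d hd => ht d (by simp [hd]))
    by_cases hcur : cur.isEmpty
    · simp only [PySem.Chars.split₀.go, hc, hcur, if_true]
      rw [ih' [] acc]
      simp [PySem.Chars.split₀.go]
    · simp only [PySem.Chars.split₀.go, hc, hcur, if_true, Bool.false_eq_true, if_false]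
      rw [ih' [] (cur.reverse :: acc)]
      simp [PySem.Chars.split₀.go]
theorem pvGoAppendSpaces (s t : List Char) (ht : ∀ c ∈ t, PySem.Chars.isspace c) :
    ∀ cur acc, PySem.Chars.split₀.go (s ++ t) cur acc = PySem.Chars.split₀.go s cur acc := by
  induction s with
  | nil => intro cur acc; simpa using pvGoSpaces t ht cur acc
  | cons c rest ih =>
    intro cur acc
    by_cases hs : PySem.Chars.isspace c
    · by_cases hcur : cur.isEmpty <;>
        simp only [List.cons_append, PySem.Chars.split₀.go, hs, if_true, hcur, ih,
          Bool.false_eq_true, if_false]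
    · simp only [List.cons_append, PySem.Chars.split₀.go, hs, Bool.false_eq_true, if_false, ih]
theorem split₀_strip (s : List Char) :
    PySem.Chars.split₀ (PySem.Chars.strip s) = PySem.Chars.split₀ s := by
  have hskip : ∀ u : List Char, PySem.Chars.split₀ u = PySem.Chars.split₀ (u.dropWhile PySem.Chars.isspace) := by
    intro u
    unfold PySem.Chars.split₀
    induction u with
    | nil => simp
    | cons c rest ih =>
      by_cases hs : PySem.Chars.isspace c
      · simpa [PySem.Chars.split₀.go, hs] using ih
      · simp [hs]
  have hr : ∀ u : List Char, PySem.Chars.split₀ (PySem.Chars.rstrip u) = PySem.Chars.split₀ u := by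
    intro u
    have hdecomp : u = PySem.Chars.rstrip u ++ (u.reverse.takeWhile PySem.Chars.isspace).reverse := by
      unfold PySem.Chars.rstrip
      rw [← List.reverse_append, List.takeWhile_append_dropWhile, List.reverse_reverse]
    conv_rhs => rw [hdecomp]
    unfold PySem.Chars.split₀
    rw [pvGoAppendSpaces _ _ (by
      intro c hc
      have := List.mem_takeWhile_imp (by simpa using hc)
      exact this)]
  unfold PySem.Chars.strip
  rw [hr]
  unfold PySem.Chars.lstrip
  exact (hskip s).symm
theorem pvOfListEq (a b : List Char) : (String.ofList a = String.ofList b) ↔ a = b :=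
  ⟨fun h => by simpa using congrArg String.toList h, fun h => by rw [h]⟩
theorem pvXXlit : ("XX" : String) = String.ofList ['X', 'X'] := by decide
theorem pvALoop_eq_pairC (ts : List String) : ∀ rs : List String,
    (if rs.length < ts.length then false else pvALoop (ts.zip rs))
      = pvPairC (ts.map String.toList) (rs.map String.toList) := by
  induction ts with
  | nil => intro rs; simp [pvALoop, pvPairC]
  | cons t ts ih =>
    intro rs
    cases rs with
    | nil => simp [pvPairC]
    | cons r rs =>
      have h := ih rs
      have hXX : (PySem.Str.upper t == "XX") = decide (PySem.Chars.upper t.toList = ['X', 'X']) := by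
        rw [pvXXlit, Bool.beq_eq_decide_eq]
        exact decide_eq_decide.mpr (by simp only [PySem.Str.upper]; exact pvOfListEq _ _)
      have hTR : (PySem.Str.upper t == PySem.Str.upper r)
          = decide (PySem.Chars.upper t.toList = PySem.Chars.upper r.toList) := by
        rw [Bool.beq_eq_decide_eq]
        exact decide_eq_decide.mpr (by simp only [PySem.Str.upper]; exact pvOfListEq _ _)
      by_cases hlt : rs.length < ts.length
      · simp only [hlt, if_pos] at h
        simp only [List.length_cons, Nat.succ_lt_succ hlt, if_pos, List.zip_cons_cons, pvALoop,
          List.map_cons, pvPairC, hXX, hTR]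
        split_ifs with h1 h2 <;> simp_all
      · simp only [hlt, if_false] at h
        have hlt' : ¬ (rs.length + 1 < ts.length + 1) := by omega
        simp only [List.length_cons, hlt', if_false, List.zip_cons_cons, pvALoop, List.map_cons,
          pvPairC, hXX, hTR, ← h]
        split_ifs with h1 h2 <;> simp_all
theorem pvScan_eq_pairC_aux : ∀ n : Nat, ∀ t r : List Char, t.length ≤ n →
    pvScan t r = pvPairC (PySem.Chars.split₀ t) (PySem.Chars.split₀ r) := by
  intro n
  induction n with
  | zero =>
    intro t r hlen
    have ht : t = [] := List.length_eq_zero_iff.mp (Nat.le_zero.mp hlen)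
    subst ht
    rw [pvScan, split₀_unfold]
    simp [pvPairC]
  | succ n ih =>
    intro t r hlen
    rw [pvScan]
    cases hd : t.dropWhile PySem.Chars.isspace with
    | nil =>
      rw [split₀_unfold t, hd]
      simp [pvPairC]
    | cons c ts =>
      dsimp only
      have hc : PySem.Chars.isspace c = false := by
        have h2 := List.head_dropWhile_not PySem.Chars.isspace (l := t) (by simp [hd])
        simpa only [hd, List.head_cons] using h2
      have hlen' : (List.dropWhile (fun x => !PySem.Chars.isspace x) (c :: ts)).length ≤ n := by
        have h1 : (c :: ts).length ≤ t.length := by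
          simpa [hd] using List.length_dropWhile_le PySem.Chars.isspace t
        have h3 := List.length_dropWhile_le (fun x => !PySem.Chars.isspace x) ts
        simp only [List.dropWhile_cons, hc, Bool.not_false, if_pos, List.length_cons] at *
        omega
      have hsplit_t : PySem.Chars.split₀ t
          = List.takeWhile (fun x => !PySem.Chars.isspace x) (c :: ts)
            :: PySem.Chars.split₀ (List.dropWhile (fun x => !PySem.Chars.isspace x) (c :: ts)) := by
        rw [split₀_unfold t, hd]
      have htok : List.takeWhile (fun x => !PySem.Chars.isspace x) (c :: ts)
          = c :: List.takeWhile (fun x => !PySem.Chars.isspace x) ts := by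
        simp [hc]
      rw [hsplit_t]
      cases hr1 : List.dropWhile PySem.Chars.isspace r with
      | nil =>
        have hsplit_r : PySem.Chars.split₀ r = [] := by rw [split₀_unfold r, hr1]
        rw [hsplit_r]
        by_cases hw : pvIsWild (List.takeWhile (fun x => !PySem.Chars.isspace x) (c :: ts)) = true
        · simp [hw, pvPairC]
        · simp only [hw, Bool.false_eq_true, if_false]
          rw [pvLitScan_eq]
          simp [htok, PySem.Chars.upper, pvPairC]
      | cons d rs' =>
        have hsplit_r : PySem.Chars.split₀ r
            = List.takeWhile (fun x => !PySem.Chars.isspace x) (d :: rs')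
              :: PySem.Chars.split₀ (List.dropWhile (fun x => !PySem.Chars.isspace x) (d :: rs')) := by
          rw [split₀_unfold r, hr1]
        rw [hsplit_r]
        by_cases hw : pvIsWild (List.takeWhile (fun x => !PySem.Chars.isspace x) (c :: ts)) = true
        · have hXX : PySem.Chars.upper (List.takeWhile (fun x => !PySem.Chars.isspace x) (c :: ts)) = ['X', 'X'] := by
            have := pvIsWild_eq (List.takeWhile (fun x => !PySem.Chars.isspace x) (c :: ts))
            rw [hw] at this
            exact of_decide_eq_true this.symm
          simp only [hw, pvPairC, hXX, if_pos]
          exact ih _ _ hlen'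
        · have hXX : ¬ PySem.Chars.upper (List.takeWhile (fun x => !PySem.Chars.isspace x) (c :: ts)) = ['X', 'X'] := by
            intro hcontr
            exact hw (by rw [pvIsWild_eq, hcontr]; simp)
          simp only [hw, Bool.false_eq_true, if_false]
          rw [pvLitScan_eq]
          by_cases he : PySem.Chars.upper (List.takeWhile (fun x => !PySem.Chars.isspace x) (c :: ts))
              = PySem.Chars.upper (List.takeWhile (fun x => !PySem.Chars.isspace x) (d :: rs'))
          · rw [if_pos he]
            simp only [pvPairC, ne_eq, he, not_true_eq_false, if_false, ite_self]
            exact ih _ _ hlen'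
          · rw [if_neg he]
            simp only [pvPairC, if_neg hXX, ne_eq, he, not_false_eq_true, if_pos]

theorem pvScan_eq_pairC (t r : List Char) :
    pvScan t r = pvPairC (PySem.Chars.split₀ t) (PySem.Chars.split₀ r) :=
  pvScan_eq_pairC_aux t.length t r le_rfl

theorem pvSplitStrip_toList (s : String) :
    (PySem.Str.split₀ (PySem.Str.strip s)).map String.toList = PySem.Chars.split₀ s.toList := by
  simp only [PySem.Str.split₀, PySem.Str.strip, String.toList_ofList, List.map_map]
  rw [show (String.toList ∘ String.ofList) = id from funext (fun _ => String.toList_ofList)]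
  simp [split₀_strip]

-- ===== VERDICT (by name: the statement is the Claim_ definition above) =====
theorem match_hex_template_py_spec : Claim_equal_match_hex_template_py := by
  intro template raw_hex _
  unfold Spec_match_hex_template_py match_hex_template_py match_hex_template_py_alt
  rw [pvALoop_eq_pairC, pvSplitStrip_toList, pvSplitStrip_toList, pvScan_eq_pairC]
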